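-- pv_equiv track=rewrite | github.com/jabirhaque/DataStructuresAlgorithms | q4.py | sar
-- ===== SOURCE A (Python) =====
-- def sar(k):
--     if k % 2 == 0:
--         result = []
--         for i in range(k):
--             if i < k/2: result.append(1)
--             else: result.append(-1)
--         return result
--     result = sar(k - 1)
--     result.append(0)
--     return result
-- ===== SOURCE B (Python) =====
-- def sar(k):
--     half = k // 2
--     return [1] * half + [-1] * half + [0] * (k % 2)
-- ===== Notes on version B (the rewrite author's own statement) =====
-- stated objective: simpler
-- what changed: Replaces the loop-with-threshold-test plus the recursive odd case by a closed-form list construction [1]*(k//2) + [-1]*(k//2) + [0]*(k%2).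
import Mathlib
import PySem

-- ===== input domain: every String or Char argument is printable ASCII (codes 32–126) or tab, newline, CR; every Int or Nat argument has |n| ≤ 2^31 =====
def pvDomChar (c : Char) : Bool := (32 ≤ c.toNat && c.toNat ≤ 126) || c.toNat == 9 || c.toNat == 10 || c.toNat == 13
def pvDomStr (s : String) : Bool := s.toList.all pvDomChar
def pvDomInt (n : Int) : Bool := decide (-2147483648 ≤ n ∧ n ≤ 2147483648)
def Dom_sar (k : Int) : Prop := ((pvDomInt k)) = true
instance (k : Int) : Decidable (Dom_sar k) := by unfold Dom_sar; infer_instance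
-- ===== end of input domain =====

-- B replaces A's threshold-test loop plus odd-case recursion by a closed-form
-- [1]*(k//2) ++ [-1]*(k//2) ++ [0]*(k%2) construction (objective: simpler).

-- ===== PORT A =====
-- 'i < k/2' in A is float true division; in the even branch (k % 2 == 0) it is
-- exactly 'i < k // 2', which is how it is ported (exact on that branch's inputs).
def sar (k : Int) : List Int :=
  if PySem.Int.mod k 2 = 0 then
    (PySem.List.pyRange 0 k 1).foldl
      (fun result i => result ++ [if i < PySem.Int.floordiv k 2 then (1 : Int) else -1]) []
  else
    sar (k - 1) ++ [0]
termination_by (PySem.Int.mod k 2).natAbs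
decreasing_by
  rename_i h
  have h1 : PySem.Int.mod k 2 = k % 2 := PySem.Int.mod_eq_emod_of_pos (by norm_num : (0:Int) < 2)
  have h2 : PySem.Int.mod (k - 1) 2 = (k - 1) % 2 := PySem.Int.mod_eq_emod_of_pos (by norm_num : (0:Int) < 2)
  omega

-- ===== PORT B =====
def sar_alt (k : Int) : List Int :=
  List.replicate (PySem.Int.floordiv k 2).toNat 1 ++
    List.replicate (PySem.Int.floordiv k 2).toNat (-1) ++
    List.replicate (PySem.Int.mod k 2).toNat 0

-- ===== PRECONDITION & SPEC =====
def Spec_sar (k : Int) (out : List Int) : Prop := out = sar_alt k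
instance (k : Int) (out : List Int) : Decidable (Spec_sar k out) := by unfold Spec_sar; infer_instance

-- ===== CLAIM (what is proved, stated in full; the proofs are below) =====
def Claim_equal_sar : Prop := ∀ (k : Int), Dom_sar k → Spec_sar k (sar k)

-- ===== LEMMAS AND PROOFS =====

-- The even-branch loop body characterised: k/2 ones followed by k/2 minus-ones.
theorem sar_even_map (m : Nat) (c : Int) (hc : c = (m : Int)) :
    (List.range (2 * m)).map ((fun x : Int => if x < c then (1 : Int) else -1) ∘ (fun j : Nat => (j : Int))) =
      List.replicate m (1 : Int) ++ List.replicate m (-1) := by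
  subst hc
  apply List.ext_getElem
  · simp [Nat.two_mul]
  · intro i h1 h2
    simp only [List.getElem_map, List.getElem_range, Function.comp]
    rcases lt_or_ge i m with hi | hi
    · rw [List.getElem_append_left (by simpa using hi)]
      have hii : ((i : Int)) < (m : Int) := by exact_mod_cast hi
      simp [hii]
    · rw [List.getElem_append_right (by simpa using hi)]
      have hii : ¬ ((i : Int) < (m : Int)) := by exact_mod_cast not_lt.mpr hi
      simp [hii]

-- A on any even input equals B there.
theorem sar_even (k : Int) (h : PySem.Int.mod k 2 = 0) : sar k = sar_alt k := by
  have hm : PySem.Int.mod k 2 = k % 2 := PySem.Int.mod_eq_emod_of_pos (by norm_num : (0:Int) < 2)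
  have hd : PySem.Int.floordiv k 2 = k / 2 := PySem.Int.floordiv_eq_ediv_of_pos (by norm_num : (0:Int) < 2)
  rw [sar.eq_def, if_pos h, PySem.List.foldl_append_singleton_eq_map, List.nil_append,
    PySem.List.pyRange_one, List.map_map]
  simp only [sub_zero, zero_add]
  rcases le_or_gt k 0 with hk | hk
  · have h0 : k.toNat = 0 := by omega
    have hd0 : (PySem.Int.floordiv k 2).toNat = 0 := by omega
    rw [hm] at h
    simp [sar_alt, h0]
    omega
  · have h2m : k.toNat = 2 * (k / 2).toNat := by omega
    rw [h2m, sar_even_map (k / 2).toNat (PySem.Int.floordiv k 2) (by omega)]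
    rw [hm] at h
    simp [sar_alt, h]

theorem sar_eq (k : Int) : sar k = sar_alt k := by
  have hm : PySem.Int.mod k 2 = k % 2 := PySem.Int.mod_eq_emod_of_pos (by norm_num : (0:Int) < 2)
  by_cases h : PySem.Int.mod k 2 = 0
  · exact sar_even k h
  · have h1 : PySem.Int.mod k 2 = 1 := by omega
    have h0 : PySem.Int.mod (k - 1) 2 = 0 := by
      rw [PySem.Int.mod_eq_emod_of_pos (by norm_num : (0:Int) < 2)]; omega
    have hdd : PySem.Int.floordiv (k - 1) 2 = PySem.Int.floordiv k 2 := by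
      rw [PySem.Int.floordiv_eq_ediv_of_pos (by norm_num : (0:Int) < 2),
        PySem.Int.floordiv_eq_ediv_of_pos (by norm_num : (0:Int) < 2)]
      omega
    rw [sar.eq_def, if_neg h, sar_even (k - 1) h0]
    simp only [sar_alt, List.append_assoc, hdd, h0, h1]
    simp

-- ===== VERDICT (by name: the statement is the Claim_ definition above) =====
theorem sar_spec : Claim_equal_sar := by
  intro k _
  exact sar_eq k
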